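-- pv_equiv track=rewrite | github.com/LucasAndShanzhu/Graduation_Project | learn/apriori.py | createC1
-- ===== SOURCE A (Python) =====
-- def createC1(dataSet):
--     C1 = []
--     for transaction in dataSet:
--         for item in transaction:
--             if not [item] in C1:
--                 C1.append([item])
--     C1.sort()
--     return map(frozenset, C1)
-- ===== SOURCE B (Python) =====
-- def createC1(dataSet):
--     flat = sorted(item for transaction in dataSet for item in transaction)
--     C1 = []
--     i = 0
--     n = len(flat)
--     while i < n:
--         x = flat[i]
--         C1.append([x])
--         while i < n and flat[i] == x:
--             i += 1
--     return map(frozenset, C1)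
-- ===== Notes on version B (the rewrite author's own statement) =====
-- stated objective: faster
-- what changed: Replaces the per-item linear membership scan of the growing candidate list with a single flatten + sort followed by one adjacent run-skipping pass.
import Mathlib
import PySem

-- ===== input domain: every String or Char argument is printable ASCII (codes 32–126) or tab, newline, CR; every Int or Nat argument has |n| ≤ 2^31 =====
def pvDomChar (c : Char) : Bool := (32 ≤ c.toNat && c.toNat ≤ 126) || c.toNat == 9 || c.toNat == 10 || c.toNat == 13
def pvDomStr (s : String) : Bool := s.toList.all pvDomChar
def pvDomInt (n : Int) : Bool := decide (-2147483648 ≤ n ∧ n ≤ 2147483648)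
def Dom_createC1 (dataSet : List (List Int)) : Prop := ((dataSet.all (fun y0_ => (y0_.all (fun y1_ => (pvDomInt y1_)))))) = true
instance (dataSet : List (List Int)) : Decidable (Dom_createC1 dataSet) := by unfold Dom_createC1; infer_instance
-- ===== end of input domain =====

-- B replaces A's per-item membership scan of the growing C1 by one sort + one adjacent run-skipping pass (faster).
-- A's final map(frozenset, C1) turns each singleton list into a frozenset; under the type convention a frozenset of
-- one int is the one-element list, so both ports return the List (List Int) of sorted distinct singletons.

-- ===== PORT A =====
def createC1 (dataSet : List (List Int)) : List (List Int) :=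
  let C1 := dataSet.foldl (fun C1 transaction =>
    transaction.foldl (fun C1 item =>
      if [item] ∈ C1 then C1 else C1 ++ [[item]]) C1) []
  PySem.List.sorted C1 (fun x => x) false

-- ===== PORT B =====
-- the outer while-loop of Source B: emit [x] for the head of each run, skip the rest of the run (the inner while)
def dedupRuns : List Int → List (List Int)
  | [] => []
  | x :: xs => [x] :: dedupRuns (xs.dropWhile (fun y => y == x))
termination_by s => s.length
decreasing_by
  exact Nat.lt_succ_of_le (List.length_dropWhile_le _ _)

def createC1_alt (dataSet : List (List Int)) : List (List Int) :=
  let flat := PySem.List.sorted (dataSet.flatMap (fun transaction => transaction)) (fun x => x) false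
  dedupRuns flat

-- ===== PRECONDITION & SPEC =====
def Spec_createC1 (dataSet : List (List Int)) (out : List (List Int)) : Prop := out = createC1_alt dataSet
instance (dataSet : List (List Int)) (out : List (List Int)) : Decidable (Spec_createC1 dataSet out) := by unfold Spec_createC1; infer_instance

-- ===== CLAIM (what is proved, stated in full; the proofs are below) =====
def Claim_equal_createC1 : Prop := ∀ (dataSet : List (List Int)), Dom_createC1 dataSet → Spec_createC1 dataSet (createC1 dataSet)

-- ===== LEMMAS AND PROOFS =====

-- [x] < [y] in the lexicographic list order iff x < y
theorem singleton_lt_iff (x y : Int) : ([x] < [y]) ↔ x < y := by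
  constructor
  · intro h
    cases h with
    | cons h => cases h
    | rel h => exact h
  · intro h; exact List.Lex.rel h

-- A's inner loop on a state of the shape (map [·] d) is Set.add on d
theorem innerA_eq (t : List Int) : ∀ (d : List Int),
    t.foldl (fun C1 item => if [item] ∈ C1 then C1 else C1 ++ [[item]]) (d.map (fun x => [x]))
      = (t.foldl PySem.Set.add d).map (fun x => [x]) := by
  induction t with
  | nil => intro d; rfl
  | cons x xs ih =>
      intro d
      have hmem : ([x] ∈ d.map (fun x => [x])) ↔ x ∈ d := by
        simp [List.mem_map]
      by_cases h : x ∈ d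
      · simp only [List.foldl_cons]
        rw [if_pos (hmem.mpr h)]
        have : PySem.Set.add d x = d := by
          simp [PySem.Set.add, PySem.Set.contains, h]
        rw [this]; exact ih d
      · simp only [List.foldl_cons]
        rw [if_neg (fun hc => h (hmem.mp hc))]
        have : PySem.Set.add d x = d ++ [x] := by
          simp [PySem.Set.add, PySem.Set.contains, h]
        rw [this]
        have hmp : List.map (fun x => [x]) d ++ [[x]] = List.map (fun x : Int => [x]) (d ++ [x]) := by
          simp
        rw [hmp]
        exact ih (d ++ [x])

-- A's nested loops build exactly (map [·]) of the Set.add-fold over the flattened data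
theorem outerA_eq (ds : List (List Int)) : ∀ (d : List Int),
    ds.foldl (fun C1 transaction =>
        transaction.foldl (fun C1 item => if [item] ∈ C1 then C1 else C1 ++ [[item]]) C1)
      (d.map (fun x => [x]))
      = ((ds.flatMap (fun t => t)).foldl PySem.Set.add d).map (fun x => [x]) := by
  induction ds with
  | nil => intro d; rfl
  | cons t ts ih =>
      intro d
      simp only [List.foldl_cons, List.flatMap_cons, List.foldl_append]
      rw [innerA_eq, ih]

-- B's run-skipping pass over a ≤-sorted list yields (map [·]) of a strictly increasing list with the same members
theorem dedupRuns_spec : ∀ (s : List Int), s.Pairwise (· ≤ ·) →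
    ∃ ys : List Int, dedupRuns s = ys.map (fun x => [x]) ∧
      ys.Pairwise (· < ·) ∧ (∀ x, x ∈ ys ↔ x ∈ s) := by
  intro s
  induction s using dedupRuns.induct with
  | case1 => intro _; exact ⟨[], by simp [dedupRuns], by simp, by simp⟩
  | case2 x xs ih =>
      intro hp
      have hx : ∀ y ∈ xs, x ≤ y := fun y hy => (List.pairwise_cons.mp hp).1 y hy
      have hxs : xs.Pairwise (· ≤ ·) := (List.pairwise_cons.mp hp).2
      have hrest : (xs.dropWhile (fun y => y == x)).Pairwise (· ≤ ·) :=
        hxs.sublist (List.dropWhile_sublist _)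
      obtain ⟨ys, h1, h2, h3⟩ := ih hrest
      have hxnotin : x ∉ xs.dropWhile (fun y => y == x) := by
        intro hin
        cases hr : xs.dropWhile (fun y => y == x) with
        | nil => rw [hr] at hin; exact absurd hin (List.not_mem_nil)
        | cons z zs =>
            have hz : ¬ (z == x) = true := by
              have := List.head?_dropWhile_not (p := fun y => y == x) (l := xs)
              rw [hr] at this; simpa using this
            rw [hr] at hin
            cases hin with
            | head => exact hz (by simp)
            | tail _ hin' =>
                have hzx : z ≤ x := by
                  have hrp : (z :: zs).Pairwise (· ≤ ·) := by rw [← hr]; exact hrest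
                  exact (List.pairwise_cons.mp hrp).1 x hin'
                have hxz : x ≤ z := hx z ((List.dropWhile_sublist _).subset (by rw [hr]; exact List.mem_cons_self))
                exact hz (by simp [le_antisymm hzx hxz])
      refine ⟨x :: ys, ?_, ?_, ?_⟩
      · simp [dedupRuns, h1]
      · refine List.pairwise_cons.mpr ⟨?_, h2⟩
        intro y hy
        have hyr : y ∈ xs.dropWhile (fun y => y == x) := (h3 y).mp hy
        have hle : x ≤ y := hx y ((List.dropWhile_sublist _).subset hyr)
        rcases lt_or_eq_of_le hle with h | h
        · exact h
        · exact absurd (h ▸ hyr) hxnotin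
      · intro z
        constructor
        · intro hz
          cases hz with
          | head => exact List.mem_cons_self
          | tail _ hz' =>
              exact List.mem_cons_of_mem _ ((List.dropWhile_sublist _).subset ((h3 z).mp hz'))
        · intro hz
          cases hz with
          | head => exact List.mem_cons_self
          | tail _ hz' =>
              have hz2 : z ∈ xs.takeWhile (fun y => y == x) ++ xs.dropWhile (fun y => y == x) := by
                rw [List.takeWhile_append_dropWhile]; exact hz'
              rcases List.mem_append.mp hz2 with htk | hdr
              · have heq : z = x := by simpa using List.mem_takeWhile_imp htk
                exact heq ▸ List.mem_cons_self
              · exact List.mem_cons_of_mem _ ((h3 z).mpr hdr)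

theorem main_eq (dataSet : List (List Int)) : createC1 dataSet = createC1_alt dataSet := by
  have hsp : (PySem.List.sorted (dataSet.flatMap (fun transaction => transaction))
      (fun x : Int => x) false).Pairwise (· ≤ ·) :=
    PySem.List.sorted_pairwise (xs := dataSet.flatMap (fun transaction => transaction))
      (key := fun x : Int => x)
  obtain ⟨ys, h1, h2, h3⟩ := dedupRuns_spec _ hsp
  have hC1 : dataSet.foldl (fun C1 transaction =>
        transaction.foldl (fun C1 item => if [item] ∈ C1 then C1 else C1 ++ [[item]]) C1) []
      = (PySem.Set.ofList (dataSet.flatMap (fun transaction => transaction))).map (fun x => [x]) := by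
    have h := outerA_eq dataSet []
    simp only [List.map_nil] at h
    rw [h, PySem.Set.ofList_eq_foldl]
  show PySem.List.sorted (dataSet.foldl (fun C1 transaction =>
        transaction.foldl (fun C1 item => if [item] ∈ C1 then C1 else C1 ++ [[item]]) C1) [])
      (fun x => x) false
      = dedupRuns (PySem.List.sorted (dataSet.flatMap (fun transaction => transaction)) (fun x => x) false)
  rw [hC1, h1]
  have hperm : (ys.map (fun x : Int => [x])).Perm
      ((PySem.Set.ofList (dataSet.flatMap (fun transaction => transaction))).map (fun x => [x])) := by
    apply List.Perm.map
    have hnd1 : ys.Nodup := List.Pairwise.imp (fun h => ne_of_lt h) h2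
    have hnd2 : (PySem.Set.ofList (dataSet.flatMap (fun transaction => transaction))).Nodup :=
      PySem.Set.nodup_ofList _
    refine (List.perm_ext_iff_of_nodup hnd1 hnd2).mpr ?_
    intro a
    rw [h3 a, PySem.Set.mem_ofList]
    exact PySem.List.mem_sorted (xs := dataSet.flatMap (fun transaction => transaction))
      (key := fun x : Int => x) (rev := false) (x := a)
  have hpw : (ys.map (fun x : Int => [x])).Pairwise (fun a b => a < b) := by
    refine List.pairwise_map.mpr ?_
    exact h2.imp (fun h => (singleton_lt_iff _ _).mpr h)
  have hinst : (fun a b : List Int => a.decidableLT b) = (LinearOrder.toDecidableLT : DecidableLT (List Int)) := by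
    funext a b; exact Subsingleton.elim _ _
  rw [hinst]
  exact PySem.List.sorted_eq_of_perm_of_pairwise_lt _ _ _ hperm hpw

-- ===== VERDICT (by name: the statement is the Claim_ definition above) =====
theorem createC1_spec : Claim_equal_createC1 := by
  intro dataSet _
  unfold Spec_createC1
  exact main_eq dataSet
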